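-- pv_equiv track=rewrite | github.com/horaceyoung/Crisis-Management-System | CMS/infodistribution/statusreportgenerator.py | __largest_derivative
-- ===== SOURCE A (Python) =====
-- def __largest_derivative(dict1, dict2, keys):
--     """
--     Returns the key in keys which maximizes dict2[key] - dict1[key] and the value.
--     """
--     best_derivative = 0
--     best_key = None
--     for key in keys:
--         if dict2[key] - dict1[key] > best_derivative:
--             best_derivative = dict2[key] - dict1[key]
--             best_key = key
--
--     return best_key, best_derivative
-- ===== SOURCE B (Python) =====
-- def __largest_derivative(dict1, dict2, keys):
--     """
--     Returns the key in keys which maximizes dict2[key] - dict1[key] and the value.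
--     Filter-then-reduce: build (derivative, key) pairs, keep the positive ones,
--     then take the maximum derivative and the first key attaining it.
--     """
--     pos = [(dict2[k] - dict1[k], k) for k in keys]
--     pos = [(d, k) for (d, k) in pos if d > 0]
--     if not pos:
--         return None, 0
--     m = max(d for (d, _) in pos)
--     best = next(k for (d, k) in pos if d == m)
--     return best, m
-- ===== Notes on version B (the rewrite author's own statement) =====
-- stated objective: alternative
-- what changed: Replaces the fused running-best loop by a filter-then-reduce pipeline: build all (derivative,key) pairs, filter the strictly positive ones, then take the maximum derivative and the first key attaining it.
import Mathlib
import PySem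

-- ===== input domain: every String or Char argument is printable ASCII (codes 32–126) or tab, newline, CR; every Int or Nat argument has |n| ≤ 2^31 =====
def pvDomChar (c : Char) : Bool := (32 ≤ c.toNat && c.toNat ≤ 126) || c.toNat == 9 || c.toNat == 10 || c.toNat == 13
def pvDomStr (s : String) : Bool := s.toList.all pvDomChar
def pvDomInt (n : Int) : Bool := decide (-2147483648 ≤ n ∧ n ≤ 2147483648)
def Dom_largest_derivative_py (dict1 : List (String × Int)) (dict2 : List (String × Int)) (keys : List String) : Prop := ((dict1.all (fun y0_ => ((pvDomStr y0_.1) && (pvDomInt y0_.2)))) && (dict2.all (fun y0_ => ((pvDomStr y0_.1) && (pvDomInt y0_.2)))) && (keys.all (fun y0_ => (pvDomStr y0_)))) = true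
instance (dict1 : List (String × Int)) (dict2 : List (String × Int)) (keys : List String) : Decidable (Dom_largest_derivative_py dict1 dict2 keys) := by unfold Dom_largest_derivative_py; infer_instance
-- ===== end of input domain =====

-- B replaces A's fused running-best loop by a filter-then-reduce pipeline (alternative decomposition, same cost).
-- Python's dict[key] raises KeyError on a missing key; Pre_ excludes those inputs, so 'lk' (first-match lookup,
-- defaulting to 0) is exact on all admitted inputs.
def lk (d : List (String × Int)) (k : String) : Int :=
  ((d.find? (fun p => p.1 == k)).map Prod.snd).getD 0

-- ===== PORT A =====
def largest_derivative_py (dict1 : List (String × Int)) (dict2 : List (String × Int)) (keys : List String) : Option String × Int :=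
  keys.foldl (fun st key =>
    if st.2 < lk dict2 key - lk dict1 key then (some key, lk dict2 key - lk dict1 key) else st)
    (none, 0)

-- ===== PORT B =====
def largest_derivative_py_alt (dict1 : List (String × Int)) (dict2 : List (String × Int)) (keys : List String) : Option String × Int :=
  let pos := (keys.map (fun k => (lk dict2 k - lk dict1 k, k))).filter (fun p => decide (0 < p.1))
  match PySem.List.max? (pos.map Prod.fst) (fun y => y) with
  | none => (none, 0)
  | some m => ((pos.find? (fun p => p.1 == m)).map Prod.snd, m)

-- ===== PRECONDITION & SPEC =====
-- Pre_: every requested key is present in both dicts (Python raises KeyError otherwise).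
def Pre_largest_derivative_py (dict1 : List (String × Int)) (dict2 : List (String × Int)) (keys : List String) : Prop :=
  ∀ k ∈ keys, k ∈ dict1.map Prod.fst ∧ k ∈ dict2.map Prod.fst
instance (dict1 : List (String × Int)) (dict2 : List (String × Int)) (keys : List String) : Decidable (Pre_largest_derivative_py dict1 dict2 keys) := by unfold Pre_largest_derivative_py; infer_instance

def pvWitness_largest_derivative_py : (List (String × Int)) × (List (String × Int)) × List String :=
  ([("a", 1), ("b", 5)], [("a", 3), ("b", 2)], ["a", "b"])

def Spec_largest_derivative_py (dict1 : List (String × Int)) (dict2 : List (String × Int)) (keys : List String) (out : Option String × Int) : Prop := out = largest_derivative_py_alt dict1 dict2 keys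
instance (dict1 : List (String × Int)) (dict2 : List (String × Int)) (keys : List String) (out : Option String × Int) : Decidable (Spec_largest_derivative_py dict1 dict2 keys out) := by unfold Spec_largest_derivative_py; infer_instance

-- ===== CLAIM (what is proved, stated in full; the proofs are below) =====
def Claim_equal_largest_derivative_py : Prop := ∀ (dict1 : List (String × Int)) (dict2 : List (String × Int)) (keys : List String), Dom_largest_derivative_py dict1 dict2 keys → Pre_largest_derivative_py dict1 dict2 keys → Spec_largest_derivative_py dict1 dict2 keys (largest_derivative_py dict1 dict2 keys)

-- ===== LEMMAS AND PROOFS =====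

-- the positive-derivative pair list B builds
def posList (dict1 dict2 : List (String × Int)) (keys : List String) : List (Int × String) :=
  (keys.map (fun k => (lk dict2 k - lk dict1 k, k))).filter (fun p => decide (0 < p.1))

lemma posList_append (d1 d2 : List (String × Int)) (ks : List String) (x : String) :
    posList d1 d2 (ks ++ [x]) =
      posList d1 d2 ks ++ (if 0 < lk d2 x - lk d1 x then [(lk d2 x - lk d1 x, x)] else []) := by
  simp [posList, List.filter_append]
  split_ifs with h <;> simp [h]

lemma alt_eq (d1 d2 : List (String × Int)) (ks : List String) :
    largest_derivative_py_alt d1 d2 ks =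
      match PySem.List.max? ((posList d1 d2 ks).map Prod.fst) (fun y => y) with
      | none => (none, 0)
      | some m => (((posList d1 d2 ks).find? (fun p => p.1 == m)).map Prod.snd, m) := rfl

lemma pos_of_mem_posList (d1 d2 : List (String × Int)) (ks : List String) {p : Int × String}
    (hp : p ∈ posList d1 d2 ks) : 0 < p.1 := by
  have := List.of_mem_filter hp
  simpa using this

theorem main_eq (d1 d2 : List (String × Int)) (ks : List String) :
    largest_derivative_py d1 d2 ks = largest_derivative_py_alt d1 d2 ks := by
  induction ks using List.reverseRecOn with
  | nil => rfl
  | append_singleton ks x ih =>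
    have hA : largest_derivative_py d1 d2 (ks ++ [x]) =
        (fun st key =>
          if st.2 < lk d2 key - lk d1 key then (some key, lk d2 key - lk d1 key) else st)
          (largest_derivative_py d1 d2 ks) x := by
      simp [largest_derivative_py, List.foldl_append]
    rw [hA, ih]
    set dx := lk d2 x - lk d1 x with hdx
    rw [alt_eq, alt_eq, posList_append]
    simp only [← hdx]
    rcases hmax : PySem.List.max? ((posList d1 d2 ks).map Prod.fst) (fun y => y) with _ | m
    · -- pos ks is empty
      have hnil : (posList d1 d2 ks).map Prod.fst = [] := by
        exact (PySem.List.max?_eq_none_iff _ _).1 hmax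
      have hnil' : posList d1 d2 ks = [] := by
        simpa using hnil
      rw [hnil']
      by_cases hdx0 : 0 < dx
      · simp only [if_pos hdx0, List.nil_append]
        have : PySem.List.max? ([(dx, x)].map Prod.fst) (fun y => y) = some dx := by
          simp [PySem.List.max?_id_cons]
        rw [this]
        simp
      · simp only [if_neg hdx0, List.nil_append]
        simp [PySem.List.max?]
    · -- pos ks nonempty with max m
      have hmmem : m ∈ (posList d1 d2 ks).map Prod.fst := PySem.List.max?_mem hmax
      have hmax' : ∀ y ∈ (posList d1 d2 ks).map Prod.fst, y ≤ m := by
        intro y hy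
        simpa using PySem.List.max?_isMax hmax y hy
      obtain ⟨p0, hp0mem, hp0⟩ := List.mem_map.1 hmmem
      have hmpos : 0 < m := hp0 ▸ pos_of_mem_posList d1 d2 ks hp0mem
      -- the head/tail shape of map fst pos
      obtain ⟨a, rest, hshape⟩ : ∃ a rest, (posList d1 d2 ks).map Prod.fst = a :: rest := by
        rcases h : (posList d1 d2 ks).map Prod.fst with _ | ⟨a, rest⟩
        · rw [h] at hmmem; simp at hmmem
        · exact ⟨a, rest, rfl⟩
      have hfold : rest.foldl max a = m := by
        have := hmax; rw [hshape] at this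
        rw [PySem.List.max?_id_cons] at this
        exact Option.some.inj this
      by_cases hcase : m < dx
      · -- new element strictly beats the old max
        have hdx0 : 0 < dx := lt_trans hmpos hcase
        simp only [if_pos hdx0]
        have hm' : PySem.List.max? ((posList d1 d2 ks ++ [(dx, x)]).map Prod.fst) (fun y => y) = some dx := by
          rw [List.map_append, hshape]
          show PySem.List.max? (a :: (rest ++ [(dx, x)].map Prod.fst)) (fun y => y) = some dx
          rw [PySem.List.max?_id_cons]
          simp [List.foldl_append, hfold, max_eq_right (le_of_lt hcase)]
        rw [hm']
        have hnone : (posList d1 d2 ks).find? (fun p => p.1 == dx) = none := by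
          apply List.find?_eq_none.2
          intro p hp
          have : p.1 ≤ m := hmax' p.1 (List.mem_map.2 ⟨p, hp, rfl⟩)
          simp only [beq_iff_eq]
          omega
        simp [List.find?_append, hnone]
        exact fun h => absurd h (not_le.2 hcase)
      · -- old max survives
        have hkeep : (if (((posList d1 d2 ks).find? (fun p => p.1 == m)).map Prod.snd, m).2 < dx
            then (some x, dx)
            else (((posList d1 d2 ks).find? (fun p => p.1 == m)).map Prod.snd, m)) =
            (((posList d1 d2 ks).find? (fun p => p.1 == m)).map Prod.snd, m) := by
          simp [hcase]
        rw [hkeep]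
        have hfound : ((posList d1 d2 ks).find? (fun p => p.1 == m)).isSome := by
          rcases h : (posList d1 d2 ks).find? (fun p => p.1 == m) with _ | q
          · exfalso
            have := List.find?_eq_none.1 h p0 hp0mem
            simp [hp0] at this
          · simp [h]
        by_cases hdx0 : 0 < dx
        · simp only [hdx0, if_pos]
          have hm' : PySem.List.max? ((posList d1 d2 ks ++ [(dx, x)]).map Prod.fst) (fun y => y) = some m := by
            rw [List.map_append, hshape]
            show PySem.List.max? (a :: (rest ++ [(dx, x)].map Prod.fst)) (fun y => y) = some m
            rw [PySem.List.max?_id_cons]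
            simp [List.foldl_append, hfold]
            omega
          rw [hm']
          obtain ⟨q, hq⟩ := Option.isSome_iff_exists.1 hfound
          simp [List.find?_append, hq]
        · simp only [if_neg hdx0, List.append_nil]
          rw [hmax]

-- ===== VERDICT (by name: the statement is the Claim_ definition above) =====
theorem largest_derivative_py_spec : Claim_equal_largest_derivative_py := by
  intro d1 d2 ks _ _
  unfold Spec_largest_derivative_py
  exact main_eq d1 d2 ks
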